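-- pv_equiv track=rewrite | github.com/ChandlerSwift/quicktionary | blue.py | b32
-- ===== SOURCE A (Python) =====
-- vowels = 'aeiouAEIOU'
--
-- def b32(s):
--     """Has an equal number of vowels and consonants"""
--     cons = 0
--     vow = 0
--     for char in s:
--         if char in vowels:
--             vow += 1
--         else:
--             cons += 1
--
--     return cons == vow
-- ===== SOURCE B (Python) =====
-- vowels = 'aeiouAEIOU'
--
-- def b32(s):
--     """Has an equal number of vowels and consonants"""
--     total_vowels = 0
--     for v in vowels:
--         total_vowels += s.count(v)
--     return len(s) == 2 * total_vowels
-- ===== Notes on version B (the rewrite author's own statement) =====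
-- stated objective: faster
-- what changed: Instead of one per-character pass maintaining vowel and consonant counters with a membership test, B loops over the 10 vowel characters and sums a substring-count pass s.count(v) for each, then compares len(s) with 2*total_vowels.
import Mathlib
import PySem

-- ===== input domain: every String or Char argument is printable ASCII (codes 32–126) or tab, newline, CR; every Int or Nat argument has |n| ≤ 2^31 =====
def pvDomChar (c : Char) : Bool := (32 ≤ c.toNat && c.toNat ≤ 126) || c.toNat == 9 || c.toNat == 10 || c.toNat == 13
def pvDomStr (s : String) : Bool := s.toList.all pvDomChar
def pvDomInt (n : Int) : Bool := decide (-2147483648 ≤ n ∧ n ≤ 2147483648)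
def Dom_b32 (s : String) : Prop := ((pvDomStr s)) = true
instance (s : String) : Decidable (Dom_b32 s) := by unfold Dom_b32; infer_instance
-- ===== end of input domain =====

-- B replaces the per-character pass with two counters by a loop over the 10 vowel
-- characters summing s.count(v), then compares len(s) with 2*total (measured faster).

-- ===== PORT A =====
-- `char in vowels` on a single character is list membership in the vowel characters
def pvVowels : List Char := "aeiouAEIOU".toList

def b32 (s : String) : Bool :=
  let st := s.toList.foldl
    (fun (acc : Int × Int) char =>
      if pvVowels.contains char then (acc.1, acc.2 + 1) else (acc.1 + 1, acc.2))
    ((0 : Int), (0 : Int))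
  st.1 == st.2

-- ===== PORT B =====
-- for v in vowels: total += s.count(v);  return len(s) == 2 * total
def b32_alt (s : String) : Bool :=
  let total : Int := pvVowels.foldl
    (fun (t : Int) v => t + (PySem.Str.count s (String.ofList [v]) : Int)) 0
  (s.toList.length : Int) == 2 * total

-- ===== PRECONDITION & SPEC =====
def Spec_b32 (s : String) (out : Bool) : Prop := out = b32_alt s
instance (s : String) (out : Bool) : Decidable (Spec_b32 s out) := by unfold Spec_b32; infer_instance

-- ===== CLAIM (what is proved, stated in full; the proofs are below) =====
def Claim_equal_b32 : Prop := ∀ (s : String), Dom_b32 s → Spec_b32 s (b32 s)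

-- ===== LEMMAS AND PROOFS =====
-- A's fold computes (consonants, vowels)
theorem b32_fold (l : List Char) (c v : Int) :
    l.foldl
      (fun (acc : Int × Int) char =>
        if pvVowels.contains char then (acc.1, acc.2 + 1) else (acc.1 + 1, acc.2))
      (c, v)
    = (c + ((l.length : Int) - (l.countP (fun char => pvVowels.contains char) : Int)),
       v + (l.countP (fun char => pvVowels.contains char) : Int)) := by
  induction l generalizing c v with
  | nil => simp
  | cons h t ih =>
    simp only [List.foldl_cons, List.countP_cons, List.length_cons]
    by_cases hp : pvVowels.contains h
    · simp only [hp, if_pos, ih]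
      rw [Prod.mk.injEq]
      constructor <;> push_cast <;> omega
    · simp only [hp, Bool.false_eq_true, if_neg, ih, not_false_iff]
      rw [Prod.mk.injEq]
      constructor <;> push_cast <;> omega


-- str.count of a single character is List.count
theorem count_go_single (v : Char) (l : List Char) (acc : Nat) :
    PySem.Chars.count.go [v] l.length l acc = acc + l.count v := by
  induction l generalizing acc with
  | nil => simp [PySem.Chars.count.go]
  | cons h t ih =>
    simp only [List.length_cons, PySem.Chars.count.go, List.isPrefixOf,
      Bool.and_true, List.count_cons, beq_iff_eq]
    by_cases hv : v = h
    · subst hv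
      simp [ih]
      omega
    · have hv' : ¬ h = v := fun e => hv e.symm
      simp [hv, hv', ih]

theorem count_single (s : List Char) (v : Char) :
    PySem.Chars.count s [v] = s.count v := by
  have h : ([v] : List Char).isEmpty = false := rfl
  simp [PySem.Chars.count, h, count_go_single]

-- over a duplicate-free list, the indicator sum is a membership test
theorem sum_indicator (h : Char) (V : List Char) (hV : V.Nodup) :
    (V.map fun v => if h = v then (1 : Nat) else 0).sum
    = if V.contains h then 1 else 0 := by
  induction V with
  | nil => simp
  | cons w W ih =>
    rcases List.nodup_cons.mp hV with ⟨hw, hW⟩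
    simp only [List.map_cons, List.sum_cons, List.contains_cons]
    by_cases he : h = w
    · subst he
      have hc : W.contains h = false := by
        simp only [List.contains_eq_mem, decide_eq_false_iff_not]
        exact hw
      simp [ih hW, hw]
    · have : (h == w) = false := by simp [he]
      simp [he, this, ih hW]

theorem sum_map_split (f g : Char → Nat) (V : List Char) :
    (V.map fun v => f v + g v).sum = (V.map f).sum + (V.map g).sum := by
  induction V with
  | nil => simp
  | cons w W ih => simp [ih]; omega

-- summing List.count over a duplicate-free list of characters is countP of membership
theorem sum_count_eq_countP (V : List Char) (hV : V.Nodup) (l : List Char) :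
    (V.map (fun v => l.count v)).sum = l.countP (fun c => V.contains c) := by
  induction l with
  | nil => simp
  | cons h t ih =>
    have hmap : V.map (fun v => (h :: t).count v)
        = V.map (fun v => t.count v + if h = v then 1 else 0) := by
      apply List.map_congr_left
      intro v _
      rw [List.count_cons]
      by_cases he : h = v
      · simp [he]
      · simp [he]
    rw [hmap, sum_map_split, ih, sum_indicator h V hV, List.countP_cons]

-- B's loop over the vowels sums the per-vowel character counts
theorem foldl_strcount (s : String) (V : List Char) (t : Int) :
    V.foldl (fun a v => a + (PySem.Str.count s (String.ofList [v]) : Int)) t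
    = t + ((V.map fun v => s.toList.count v).sum : Int) := by
  induction V generalizing t with
  | nil => simp
  | cons w W ih =>
    simp only [List.foldl_cons, List.map_cons, List.sum_cons, ih]
    rw [PySem.Str.count_eq]
    rw [show (String.ofList [w]).toList = [w] by simp, count_single]
    push_cast
    ring

-- ===== VERDICT (by name: the statement is the Claim_ definition above) =====
theorem b32_spec : Claim_equal_b32 := by
  intro s _
  unfold Spec_b32 b32 b32_alt
  rw [b32_fold, foldl_strcount,
      sum_count_eq_countP pvVowels (by decide) s.toList]
  have hle : s.toList.countP (fun c => pvVowels.contains c) ≤ s.toList.length :=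
    List.countP_le_length
  rw [Bool.eq_iff_iff]
  simp only [beq_iff_eq]
  omega
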